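-- pv_equiv track=rewrite | github.com/viskai/optimiseur-edt | app.py | build_conflict_graph
-- ===== SOURCE A (Python) =====
-- from collections import defaultdict, Counter
-- import itertools
--
-- def get_base_specialty(group_name): return group_name.split(' G')[0]
--
-- def build_conflict_graph(specialty_groups, student_choices):
--     conflicts = defaultdict(set)
--     for student, choices in student_choices.items():
--         if len(choices) >= 2:
--             for spec1, spec2 in itertools.combinations(choices, 2):
--                 g1s, g2s = [g for g in specialty_groups if get_base_specialty(g) == spec1], [g for g in specialty_groups if get_base_specialty(g) == spec2]
--                 for g1 in g1s:
--                     for g2 in g2s: conflicts[g1].add(g2); conflicts[g2].add(g1)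
--     base_specs = {get_base_specialty(g) for g in specialty_groups}
--     for spec in base_specs:
--         same_spec_groups = [g for g in specialty_groups if get_base_specialty(g) == spec]
--         if len(same_spec_groups) > 1:
--             for g1, g2 in itertools.combinations(same_spec_groups, 2): conflicts[g1].add(g2); conflicts[g2].add(g1)
--     return conflicts
-- ===== SOURCE B (Python) =====
-- import itertools
--
-- def get_base_specialty(group_name): return group_name.split(' G')[0]
--
-- def build_conflict_graph(specialty_groups, student_choices):
--     # Index each base specialty to its groups, once.
--     index = {}
--     for g in specialty_groups:
--         index.setdefault(get_base_specialty(g), []).append(g)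
--     # Collect the DISTINCT conflicting specialty pairs (unordered, keyed by frozenset;
--     # the stored value keeps the first-seen orientation).  Expansion is decoupled from
--     # the student loop and runs once per distinct pair.
--     pairs = {}
--     for choices in student_choices.values():
--         if len(choices) >= 2:
--             for p in itertools.combinations(choices, 2):
--                 pairs.setdefault(frozenset(p), p)
--     from collections import defaultdict
--     conflicts = defaultdict(set)
--     for s1, s2 in pairs.values():
--         for g1, g2 in itertools.product(index.get(s1, ()), index.get(s2, ())):
--             conflicts[g1].add(g2); conflicts[g2].add(g1)
--     # Intra-specialty edges.
--     for groups in index.values():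
--         for g1, g2 in itertools.combinations(groups, 2):
--             conflicts[g1].add(g2); conflicts[g2].add(g1)
--     return conflicts
-- ===== Notes on version B (the rewrite author's own statement) =====
-- stated objective: faster
-- what changed: B builds a base-specialty-to-groups index once, collects the students' conflicting specialty pairs into a frozenset-keyed dict (deduplicating repeated and reversed pairs) and expands each distinct pair exactly once via the index, instead of A's re-filtering of specialty_groups and re-expanding the full group product for every pair of every student; phase-2 iterates the index instead of re-deriving and re-filtering the base-specialty set.
import Mathlib
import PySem

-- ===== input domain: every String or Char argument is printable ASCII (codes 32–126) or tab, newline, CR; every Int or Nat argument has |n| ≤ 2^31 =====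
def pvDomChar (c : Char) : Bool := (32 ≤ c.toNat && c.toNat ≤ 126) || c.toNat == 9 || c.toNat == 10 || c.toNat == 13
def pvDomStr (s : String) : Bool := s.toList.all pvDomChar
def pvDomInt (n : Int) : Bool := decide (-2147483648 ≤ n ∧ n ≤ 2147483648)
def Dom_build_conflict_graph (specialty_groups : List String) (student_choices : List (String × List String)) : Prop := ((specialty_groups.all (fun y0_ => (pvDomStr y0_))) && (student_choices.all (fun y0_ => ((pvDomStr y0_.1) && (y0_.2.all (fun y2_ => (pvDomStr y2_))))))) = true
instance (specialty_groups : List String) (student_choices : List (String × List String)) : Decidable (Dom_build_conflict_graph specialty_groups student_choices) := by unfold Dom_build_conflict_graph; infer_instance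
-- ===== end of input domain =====

-- B indexes base→groups once, dedups the students' specialty pairs (frozenset-keyed) and expands
-- each distinct pair exactly once, instead of A's re-filtering and re-expanding per student pair;
-- objective: faster. A's phase-2 iterates a Python set (hash order); the final graph does not
-- depend on that order and outputs are compared as dict-of-sets, so the ports iterate
-- first-occurrence order.

-- ===== PORT A =====
-- group_name.split(' G')[0]  (split with a nonempty separator never returns an empty list)
def pvBase (g : String) : String := ((PySem.Str.split? g " G").getD []).headD ""

-- conflicts[g1].add(g2); conflicts[g2].add(g1)  on a defaultdict(set)
def pvAddEdge (d : PySem.Dict String (PySem.Set String)) (g1 g2 : String) : PySem.Dict String (PySem.Set String) :=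
  (d.modify g1 [] (fun s => PySem.Set.add s g2)).modify g2 [] (fun s => PySem.Set.add s g1)

-- body of one (spec1, spec2) iteration: the two filters and the nested group loops
def pvExpand (specialty_groups : List String) (d : PySem.Dict String (PySem.Set String)) (pr : String × String) : PySem.Dict String (PySem.Set String) :=
  let g1s := specialty_groups.filter (fun g => pvBase g == pr.1)
  let g2s := specialty_groups.filter (fun g => pvBase g == pr.2)
  g1s.foldl (fun d g1 => g2s.foldl (fun d g2 => pvAddEdge d g1 g2) d) d

-- one iteration of "for spec1, spec2 in itertools.combinations(choices, 2): ..."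
def pvStepA (specialty_groups : List String) (d : PySem.Dict String (PySem.Set String)) (pair : List String) : PySem.Dict String (PySem.Set String) :=
  match pair with
  | [spec1, spec2] => pvExpand specialty_groups d (spec1, spec2)
  | _ => d

-- one iteration of "for g1, g2 in itertools.combinations(same_spec_groups, 2): ..."
def pvStepA2 (d : PySem.Dict String (PySem.Set String)) (pair : List String) : PySem.Dict String (PySem.Set String) :=
  match pair with
  | [g1, g2] => pvAddEdge d g1 g2
  | _ => d

def build_conflict_graph (specialty_groups : List String) (student_choices : List (String × List String)) : List (String × List String) :=
  let conflicts : PySem.Dict String (PySem.Set String) :=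
    student_choices.foldl (fun d p =>
      if 2 ≤ p.2.length then
        (PySem.List.combinations p.2 2).foldl (pvStepA specialty_groups) d
      else d) PySem.Dict.empty
  let base_specs : PySem.Set String := PySem.Set.ofList (specialty_groups.map pvBase)
  let conflicts2 :=
    base_specs.foldl (fun d spec =>
      let same := specialty_groups.filter (fun g => pvBase g == spec)
      if 1 < same.length then
        (PySem.List.combinations same 2).foldl pvStepA2 d
      else d) conflicts
  conflicts2.items

-- ===== PORT B =====
-- frozenset(p) of a 2-tuple p: frozenset equality is unordered-pair equality, modelled exactly
-- by this canonical (sorted) pair used as the dict key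
def pvCanon (s1 s2 : String) : String × String := if s1 ≤ s2 then (s1, s2) else (s2, s1)

-- one iteration of "for p in itertools.combinations(choices, 2): pairs.setdefault(frozenset(p), p)"
def pvStepPair (d : PySem.Dict (String × String) (String × String)) (pair : List String) : PySem.Dict (String × String) (String × String) :=
  match pair with
  | [s1, s2] => d.setdefault (pvCanon s1 s2) (s1, s2)
  | _ => d

-- "for g1, g2 in itertools.product(index.get(s1, ()), index.get(s2, ())): ..." (product = nested loops)
def pvExpandIdx (index : PySem.Dict String (List String)) (d : PySem.Dict String (PySem.Set String)) (pr : String × String) : PySem.Dict String (PySem.Set String) :=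
  (index.getD pr.1 []).foldl (fun d g1 => (index.getD pr.2 []).foldl (fun d g2 => pvAddEdge d g1 g2) d) d

-- one iteration of "for g1, g2 in itertools.combinations(groups, 2): ..."
def pvStepB2 (d : PySem.Dict String (PySem.Set String)) (pair : List String) : PySem.Dict String (PySem.Set String) :=
  match pair with
  | [g1, g2] => pvAddEdge d g1 g2
  | _ => d

def build_conflict_graph_alt (specialty_groups : List String) (student_choices : List (String × List String)) : List (String × List String) :=
  -- index.setdefault(get_base_specialty(g), []).append(g)  ≡  d[k] = d.get(k, []) + [g]  (Dict.modify)
  let index : PySem.Dict String (List String) :=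
    specialty_groups.foldl (fun d g => d.modify (pvBase g) [] (fun l => l ++ [g])) PySem.Dict.empty
  let pairs : PySem.Dict (String × String) (String × String) :=
    student_choices.foldl (fun d p =>
      if 2 ≤ p.2.length then
        (PySem.List.combinations p.2 2).foldl pvStepPair d
      else d) PySem.Dict.empty
  let conflicts : PySem.Dict String (PySem.Set String) :=
    pairs.values.foldl (pvExpandIdx index) PySem.Dict.empty
  let conflicts2 :=
    index.values.foldl (fun d groups =>
      (PySem.List.combinations groups 2).foldl pvStepB2 d) conflicts
  conflicts2.items

-- ===== PRECONDITION & SPEC =====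
def Spec_build_conflict_graph (specialty_groups : List String) (student_choices : List (String × List String)) (out : List (String × List String)) : Prop := out = build_conflict_graph_alt specialty_groups student_choices
instance (specialty_groups : List String) (student_choices : List (String × List String)) (out : List (String × List String)) : Decidable (Spec_build_conflict_graph specialty_groups student_choices out) := by unfold Spec_build_conflict_graph; infer_instance

-- ===== CLAIM (what is proved, stated in full; the proofs are below) =====
def Claim_equal_build_conflict_graph : Prop := ∀ (specialty_groups : List String) (student_choices : List (String × List String)), Dom_build_conflict_graph specialty_groups student_choices → Spec_build_conflict_graph specialty_groups student_choices (build_conflict_graph specialty_groups student_choices)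

-- ===== LEMMAS AND PROOFS =====

-- the grouping index of B, as a standalone value
def pvIndex (gs : List String) : PySem.Dict String (List String) :=
  gs.foldl (fun d g => d.modify (pvBase g) [] (fun l => l ++ [g])) PySem.Dict.empty

lemma pvIndex_getD (gs : List String) (spec : String) :
    (pvIndex gs).getD spec [] = gs.filter (fun g => pvBase g == spec) := by
  have h : pvIndex gs
      = (gs.map (fun g => (pvBase g, g))).foldl (fun d p => d.modify p.1 [] (fun l => l ++ [p.2])) PySem.Dict.empty := by
    simp [pvIndex, List.foldl_map]
  rw [h, PySem.Dict.getD_foldl_modify_append]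
  simp [List.filter_map, List.map_map, Function.comp_def]

lemma pvIndex_keys (gs : List String) :
    (pvIndex gs).keys = PySem.Set.ofList (gs.map pvBase) := by
  simpa [pvIndex, PySem.Set.ofList_eq_foldl, PySem.Set.update] using
    PySem.Dict.keys_foldl_modify_key gs pvBase [] (fun _ g l => l ++ [g]) PySem.Dict.empty

lemma pvIndex_nodup (gs : List String) : (pvIndex gs).keys.Nodup :=
  PySem.Dict.nodup_keys_foldl_modify_key gs pvBase [] (fun _ g l => l ++ [g]) PySem.Dict.empty
    (by simp)

-- the flat list of specialty pairs drawn from the students, in processing order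
def pvToPair (l : List String) : String × String :=
  match l with
  | [x, y] => (x, y)
  | _ => ("", "")

def pvPairs (sc : List (String × List String)) : List (String × String) :=
  sc.flatMap (fun p => if 2 ≤ p.2.length then (PySem.List.combinations p.2 2).map pvToPair else [])

-- both ports' student loops are one fold over pvPairs
lemma pvFlatten {σ : Type} (mstep : σ → List String → σ) (step : σ → String × String → σ)
    (h : ∀ a x y, mstep a [x, y] = step a (x, y)) (sc : List (String × List String)) (init : σ) :
    sc.foldl (fun a p => if 2 ≤ p.2.length then (PySem.List.combinations p.2 2).foldl mstep a else a) init
      = (pvPairs sc).foldl step init := by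
  unfold pvPairs
  rw [List.foldl_flatMap]
  apply PySem.List.foldl_congr_mem
  intro a p _
  by_cases h2 : 2 ≤ p.2.length
  · simp only [h2, if_pos]
    rw [List.foldl_map]
    apply PySem.List.foldl_congr_mem
    intro acc l hl
    have hlen := PySem.List.length_of_mem_combinations hl
    match l, hlen with
    | [x, y], _ => simp [pvToPair, h]
  · simp [h2]

-- first occurrence per canonical (unordered) pair, given the already-seen canonical keys
def pvDedupBy (seen : List (String × String)) : List (String × String) → List (String × String)
  | [] => []
  | p :: r => if pvCanon p.1 p.2 ∈ seen then pvDedupBy seen r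
              else p :: pvDedupBy (seen ++ [pvCanon p.1 p.2]) r

-- the values of B's pairs dict are exactly the canonically-deduplicated pair list
lemma pvValues_setdefault (L : List (String × String)) :
    ∀ (d : PySem.Dict (String × String) (String × String)),
      (L.foldl (fun d p => d.setdefault (pvCanon p.1 p.2) p) d).values = d.values ++ pvDedupBy d.keys L := by
  induction L with
  | nil => intro d; simp [pvDedupBy]
  | cons p r ih =>
    intro d
    by_cases hc : d.contains (pvCanon p.1 p.2) = true
    · rw [List.foldl_cons, PySem.Dict.setdefault_of_contains (h := hc), ih]
      have hm : pvCanon p.1 p.2 ∈ d.keys := (PySem.Dict.contains_iff_mem_keys _ _).mp hc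
      simp [pvDedupBy, hm]
    · have hc' : d.contains (pvCanon p.1 p.2) = false := by simpa using hc
      have hm : pvCanon p.1 p.2 ∉ d.keys := fun h => by
        rw [(PySem.Dict.contains_iff_mem_keys _ _).mpr h] at hc'; simp at hc'
      rw [List.foldl_cons, PySem.Dict.setdefault_of_not_contains (h := hc'), ih]
      have hitems := PySem.Dict.items_insert_of_not_contains d p hc'
      have hkeys : (d.insert (pvCanon p.1 p.2) p).keys = d.keys ++ [pvCanon p.1 p.2] := by
        simp [PySem.Dict.keys, hitems]
      have hvals : (d.insert (pvCanon p.1 p.2) p).values = d.values ++ [p] := by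
        simp [PySem.Dict.values, hitems]
      rw [hvals, hkeys, pvDedupBy, if_neg hm]
      simp

-- "the edges of specialty pair pr are already all in d"
def pvEdges (gs : List String) (d : PySem.Dict String (PySem.Set String)) (pr : String × String) : Prop :=
  ∀ g1 ∈ gs.filter (fun g => pvBase g == pr.1), ∀ g2 ∈ gs.filter (fun g => pvBase g == pr.2),
    g2 ∈ d.getD g1 [] ∧ g1 ∈ d.getD g2 []

lemma pvEdges_swap {gs d} {a b : String} (h : pvEdges gs d (a, b)) : pvEdges gs d (b, a) := by
  intro g1 h1 g2 h2
  exact ⟨(h g2 h2 g1 h1).2, (h g2 h2 g1 h1).1⟩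

lemma pvFoldl_pres {σ β : Type} (P : σ → Prop) (f : σ → β → σ) (h : ∀ s b, P s → P (f s b)) :
    ∀ (l : List β) (s : σ), P s → P (l.foldl f s) := by
  intro l
  induction l with
  | nil => intro s hs; exact hs
  | cons b r ih => intro s hs; exact ih _ (h s b hs)

lemma pvFoldl_fix {σ β : Type} (f : σ → β → σ) :
    ∀ (l : List β) (s : σ), (∀ b ∈ l, f s b = s) → l.foldl f s = s := by
  intro l
  induction l with
  | nil => intro s _; rfl
  | cons b r ih =>
    intro s h
    rw [List.foldl_cons, h b (by simp)]
    exact ih s (fun c hc => h c (by simp [hc]))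

lemma pvMem_addEdge {d : PySem.Dict String (PySem.Set String)} {g x : String} (a b : String)
    (h : x ∈ d.getD g []) : x ∈ (pvAddEdge d a b).getD g [] := by
  simp only [pvAddEdge, PySem.Dict.getD_modify]
  split_ifs <;> simp_all [PySem.Set.mem_add]

lemma pvNodup_addEdge {d : PySem.Dict String (PySem.Set String)} (a b : String)
    (h : d.keys.Nodup) : (pvAddEdge d a b).keys.Nodup := by
  simp only [pvAddEdge, PySem.Dict.modify]
  exact PySem.Dict.nodup_keys_insert _ _ _ (PySem.Dict.nodup_keys_insert _ _ _ h)

lemma pvMem_expand {gs : List String} {d : PySem.Dict String (PySem.Set String)} {g x : String}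
    (pr : String × String) (h : x ∈ d.getD g []) : x ∈ (pvExpand gs d pr).getD g [] := by
  unfold pvExpand
  refine pvFoldl_pres (fun d : PySem.Dict String (PySem.Set String) => x ∈ d.getD g []) _ (fun s b hs => ?_) _ d h
  exact pvFoldl_pres (fun d : PySem.Dict String (PySem.Set String) => x ∈ d.getD g []) _ (fun s c hs => pvMem_addEdge _ _ hs) _ s hs

lemma pvNodup_expand {gs : List String} {d : PySem.Dict String (PySem.Set String)}
    (pr : String × String) (h : d.keys.Nodup) : (pvExpand gs d pr).keys.Nodup := by
  unfold pvExpand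
  refine pvFoldl_pres (fun d : PySem.Dict String (PySem.Set String) => d.keys.Nodup) _ (fun s b hs => ?_) _ d h
  exact pvFoldl_pres (fun d : PySem.Dict String (PySem.Set String) => d.keys.Nodup) _
    (fun s c hs => pvNodup_addEdge _ _ hs) _ s hs

lemma pvEdges_mono {gs d} (pr : String × String) {q : String × String}
    (h : pvEdges gs d q) : pvEdges gs (pvExpand gs d pr) q := by
  intro g1 h1 g2 h2
  exact ⟨pvMem_expand pr (h g1 h1 g2 h2).1, pvMem_expand pr (h g1 h1 g2 h2).2⟩

lemma pvAddEdge_self (d : PySem.Dict String (PySem.Set String)) (a b : String) :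
    b ∈ (pvAddEdge d a b).getD a [] ∧ a ∈ (pvAddEdge d a b).getD b [] := by
  by_cases hab : a = b <;>
    · simp only [pvAddEdge, PySem.Dict.getD_modify]
      split_ifs <;> simp_all [PySem.Set.mem_add]

-- after the inner loop over G2 (with g1 fixed), every g2 ∈ G2 is connected to g1
lemma pvInner_est (a : String) (G2 : List String) :
    ∀ (d : PySem.Dict String (PySem.Set String)), ∀ b ∈ G2,
      b ∈ (G2.foldl (fun d g2 => pvAddEdge d a g2) d).getD a [] ∧
      a ∈ (G2.foldl (fun d g2 => pvAddEdge d a g2) d).getD b [] := by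
  induction G2 with
  | nil => intro d b hb; simp at hb
  | cons c r ih =>
    intro d b hb
    rw [List.foldl_cons]
    rcases List.mem_cons.mp hb with h | h
    · subst h
      refine pvFoldl_pres (fun d : PySem.Dict String (PySem.Set String) => b ∈ d.getD a [] ∧ a ∈ d.getD b [])
        _ (fun s g2 hs => ⟨pvMem_addEdge _ _ hs.1, pvMem_addEdge _ _ hs.2⟩) r _ (pvAddEdge_self d a b)
    · exact ih _ b h

lemma pvExpand_est (gs : List String) (d : PySem.Dict String (PySem.Set String)) (pr : String × String) :
    pvEdges gs (pvExpand gs d pr) pr := by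
  unfold pvExpand pvEdges
  intro g1 h1 g2 h2
  -- induction over the outer list, generalizing d
  revert d
  generalize hG1 : gs.filter (fun g => pvBase g == pr.1) = G1 at h1
  generalize hG2 : gs.filter (fun g => pvBase g == pr.2) = G2 at h2
  clear hG1 hG2
  induction G1 with
  | nil => intro d; simp at h1
  | cons a r ih =>
    intro d
    rw [List.foldl_cons]
    rcases List.mem_cons.mp h1 with h | h
    · subst h
      refine pvFoldl_pres (fun d : PySem.Dict String (PySem.Set String) => g2 ∈ d.getD g1 [] ∧ g1 ∈ d.getD g2 [])
        _ (fun s b hs => ?_) r _ (pvInner_est g1 G2 d g2 h2)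
      exact pvFoldl_pres (fun d : PySem.Dict String (PySem.Set String) => g2 ∈ d.getD g1 [] ∧ g1 ∈ d.getD g2 [])
        _ (fun s c hs => ⟨pvMem_addEdge _ _ hs.1, pvMem_addEdge _ _ hs.2⟩) G2 _ hs
    · exact ih h _

-- inserting the value a key already holds changes nothing (keys unique)
lemma pvMapFix {κ ν : Type} [BEq κ] [LawfulBEq κ] (k : κ) (v : ν) :
    ∀ (l : List (κ × ν)), (l.map Prod.fst).Nodup →
      Option.map (fun x => x.2) (l.find? (fun p => p.1 == k)) = some v →
      l.map (fun p => if (p.1 == k) = true then (k, v) else p) = l := by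
  intro l
  induction l with
  | nil => intro _ h; simp at h
  | cons a r ih =>
    intro hnd hfind
    by_cases hk : (a.1 == k) = true
    · have hak : a.1 = k := by simpa using hk
      rw [show List.find? (fun p => p.1 == k) (a :: r) = some a from by simp [hk]] at hfind
      have hv : a.2 = v := by simpa using hfind
      have hnotin : k ∉ r.map Prod.fst := by
        rw [← hak]; exact (List.nodup_cons.mp (by simpa using hnd)).1
      have htail : r.map (fun p => if (p.1 == k) = true then (k, v) else p) = r := by
        have : ∀ p ∈ r, (if (p.1 == k) = true then (k, v) else p) = p := by
          intro p hp
          have : p.1 ≠ k := fun he => hnotin (he ▸ List.mem_map_of_mem hp)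
          simp [this]
        rw [List.map_congr_left this]; simp
      have hha : ((k, v) : κ × ν) = a := by rw [← hak, ← hv]
      rw [List.map_cons, if_pos hk, htail, hha]
    · have hk' : (a.1 == k) = false := by simpa using hk
      rw [show List.find? (fun p => p.1 == k) (a :: r) = List.find? (fun p => p.1 == k) r from by simp [hk']] at hfind
      have := ih (List.nodup_cons.mp (by simpa using hnd)).2 hfind
      simp [hk', this]

lemma pvInsertSame {κ ν : Type} [BEq κ] [LawfulBEq κ] (d : PySem.Dict κ ν) (k : κ) (v : ν)
    (hnd : d.keys.Nodup) (hget : d.get? k = some v) : d.insert k v = d := by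
  have hc : d.contains k = true := by
    rw [PySem.Dict.contains_eq_isSome_get?, hget]; rfl
  apply PySem.Dict.ext
  rw [PySem.Dict.items_insert_of_contains d v hc]
  exact pvMapFix k v d.items (by simpa [PySem.Dict.keys] using hnd) (by simpa [PySem.Dict.get?] using hget)

lemma pvAddEdge_noop {d : PySem.Dict String (PySem.Set String)} {a b : String}
    (hnd : d.keys.Nodup) (h1 : b ∈ d.getD a []) (h2 : a ∈ d.getD b []) : pvAddEdge d a b = d := by
  have step : ∀ (d : PySem.Dict String (PySem.Set String)) (x y : String), d.keys.Nodup →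
      y ∈ PySem.Dict.getD d x [] → PySem.Dict.modify d x [] (fun s => PySem.Set.add s y) = d := by
    intro d x y hnd hmem
    obtain ⟨s, hs⟩ : ∃ s, d.get? x = some s := by
      cases hgx : d.get? x with
      | none => rw [PySem.Dict.getD_eq_get?_getD, hgx] at hmem; simp at hmem
      | some s => exact ⟨s, rfl⟩
    have hms : y ∈ s := by rwa [PySem.Dict.getD_eq_get?_getD, hs] at hmem
    have hadd : PySem.Set.add s y = s := by simp [PySem.Set.add]; exact hms
    rw [PySem.Dict.modify, PySem.Dict.getD_eq_get?_getD, hs]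
    simp only [Option.getD_some, hadd]
    exact pvInsertSame d x s hnd hs
  have e1 := step d a b hnd h1
  rw [pvAddEdge, e1, step d b a hnd h2]

lemma pvExpand_noop {gs : List String} {d : PySem.Dict String (PySem.Set String)} {pr : String × String}
    (hnd : d.keys.Nodup) (hE : pvEdges gs d pr) : pvExpand gs d pr = d := by
  unfold pvExpand
  refine pvFoldl_fix _ _ _ (fun g1 h1 => ?_)
  refine pvFoldl_fix _ _ _ (fun g2 h2 => ?_)
  exact pvAddEdge_noop hnd (hE g1 h1 g2 h2).1 (hE g1 h1 g2 h2).2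

lemma pvCanon_cases {a b c d : String} (h : pvCanon a b = pvCanon c d) :
    (c, d) = (a, b) ∨ (c, d) = (b, a) := by
  unfold pvCanon at h
  split_ifs at h
  · exact Or.inl h.symm
  · rw [Prod.mk.injEq] at h
    exact Or.inr (by rw [← h.1, ← h.2])
  · exact Or.inr h.symm
  · rw [Prod.mk.injEq] at h
    exact Or.inl (by rw [← h.1, ← h.2])

-- processing the canonically-deduplicated pair list gives the same dict as processing all pairs
lemma pvDedup_fold (gs : List String) :
    ∀ (L : List (String × String)) (seen : List (String × String)) (d : PySem.Dict String (PySem.Set String)),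
      d.keys.Nodup → (∀ q : String × String, pvCanon q.1 q.2 ∈ seen → pvEdges gs d q) →
      L.foldl (pvExpand gs) d = (pvDedupBy seen L).foldl (pvExpand gs) d := by
  intro L
  induction L with
  | nil => intro seen d _ _; simp [pvDedupBy]
  | cons p r ih =>
    intro seen d hnd hseen
    by_cases hc : pvCanon p.1 p.2 ∈ seen
    · rw [List.foldl_cons, pvDedupBy, if_pos hc, pvExpand_noop hnd (hseen p hc)]
      exact ih seen d hnd hseen
    · rw [List.foldl_cons, pvDedupBy, if_neg hc, List.foldl_cons]
      refine ih (seen ++ [pvCanon p.1 p.2]) (pvExpand gs d p) (pvNodup_expand p hnd) ?_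
      intro q hq
      rcases List.mem_append.mp hq with h | h
      · exact pvEdges_mono p (hseen q h)
      · have hcc : pvCanon q.1 q.2 = pvCanon p.1 p.2 := by simpa using h
        have hest : pvEdges gs (pvExpand gs d p) (p.1, p.2) := by
          simpa using pvExpand_est gs d p
        rcases pvCanon_cases hcc with he | he
        · have hq : q = (p.1, p.2) := by rw [he]
          rw [hq]; exact hest
        · rw [Prod.mk.injEq] at he
          have hq : q = (p.2, p.1) := by rw [he.1, he.2]
          rw [hq]; exact pvEdges_swap hest

-- phase-2 folds agree (A's guard is redundant: combinations of a short list is empty)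
lemma pvPhase2_eq (gs : List String) (d : PySem.Dict String (PySem.Set String)) :
    (PySem.Set.ofList (gs.map pvBase)).foldl
        (fun d spec =>
          let same := gs.filter (fun g => pvBase g == spec)
          if 1 < same.length then (PySem.List.combinations same 2).foldl pvStepA2 d else d) d
      = (pvIndex gs).values.foldl
          (fun d groups => (PySem.List.combinations groups 2).foldl pvStepB2 d) d := by
  rw [PySem.Dict.values_eq_map_keys (pvIndex gs) (pvIndex_nodup gs) ([] : List String),
      pvIndex_keys, List.foldl_map]
  apply PySem.List.foldl_congr_mem
  intro acc spec _
  rw [pvIndex_getD]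
  have hstep : pvStepA2 = pvStepB2 := by
    funext d pair
    cases pair with
    | nil => rfl
    | cons a t => cases t with
      | nil => rfl
      | cons b t2 => cases t2 <;> rfl
  by_cases hl : 1 < (gs.filter (fun g => pvBase g == spec)).length
  · simp only [hl, if_pos, hstep]
  · have : (gs.filter (fun g => pvBase g == spec)).length < 2 := by omega
    simp [hl, PySem.List.combinations_eq_nil_of_length_lt _ this]

theorem build_conflict_graph_spec_aux (gs : List String) (sc : List (String × List String)) :
    build_conflict_graph gs sc = build_conflict_graph_alt gs sc := by
  have hA : build_conflict_graph gs sc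
      = ((PySem.Set.ofList (gs.map pvBase)).foldl
          (fun d spec =>
            let same := gs.filter (fun g => pvBase g == spec)
            if 1 < same.length then (PySem.List.combinations same 2).foldl pvStepA2 d else d)
          (sc.foldl (fun d p =>
            if 2 ≤ p.2.length then (PySem.List.combinations p.2 2).foldl (pvStepA gs) d else d)
            PySem.Dict.empty)).items := rfl
  have hB : build_conflict_graph_alt gs sc
      = ((pvIndex gs).values.foldl
          (fun d groups => (PySem.List.combinations groups 2).foldl pvStepB2 d)
          ((sc.foldl (fun d p =>
              if 2 ≤ p.2.length then (PySem.List.combinations p.2 2).foldl pvStepPair d else d)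
              PySem.Dict.empty).values.foldl (pvExpandIdx (pvIndex gs)) PySem.Dict.empty)).items := rfl
  rw [hA, hB]
  rw [pvFlatten (pvStepA gs) (pvExpand gs) (fun a x y => rfl) sc PySem.Dict.empty]
  rw [pvFlatten pvStepPair (fun d p => d.setdefault (pvCanon p.1 p.2) p) (fun a x y => rfl) sc PySem.Dict.empty]
  rw [pvValues_setdefault (pvPairs sc) PySem.Dict.empty]
  rw [show (PySem.Dict.empty : PySem.Dict (String × String) (String × String)).values = [] from rfl,
      show (PySem.Dict.empty : PySem.Dict (String × String) (String × String)).keys = [] from rfl,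
      List.nil_append]
  rw [PySem.List.foldl_congr_mem (pvDedupBy [] (pvPairs sc)) (pvExpandIdx (pvIndex gs)) (pvExpand gs)
      PySem.Dict.empty (fun acc pr _ => by simp [pvExpandIdx, pvExpand, pvIndex_getD])]
  rw [← pvDedup_fold gs (pvPairs sc) [] PySem.Dict.empty (by simp [PySem.Dict.keys, PySem.Dict.empty])
      (fun q hq => by simp at hq)]
  rw [pvPhase2_eq]

-- ===== VERDICT (by name: the statement is the Claim_ definition above) =====
theorem build_conflict_graph_spec : Claim_equal_build_conflict_graph := by
  intro gs sc _
  unfold Spec_build_conflict_graph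
  exact build_conflict_graph_spec_aux gs sc
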